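-- pv_equiv track=rewrite | github.com/antoniovs1029/ProyectoAnalisisTexto | myutils.py | disjoin_frecs
-- ===== SOURCE A (Python) =====
-- def disjoin_frecs(frecs, min_frec = 0):
--     """
--     :param frecs: lista de 3 objetos Counter()
--     :param min_frec: entero
--     :return lista de sets de las palabras más frecuentes, que tienen mayor frecuencia a min_frec y que solo son frecuentes en uno de los géneros de películas
--     """
--     sets = []
--     for i in range(3):
--         s = set()
--         for k in list(frecs[i].keys()):
--             if frecs[i][k] > min_frec:
--                 s.add(k)
--         sets.append(s)
--
--     s = (sets[0] | sets[1] | sets[2]) - ((sets[0] & sets[1]) | (sets[0] & sets[2]) | (sets[1] & sets[2]))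
--
--     return [s & sets[0], s & sets[1], s & sets[2]]
-- ===== SOURCE B (Python) =====
-- def disjoin_frecs(frecs, min_frec=0):
--     """Membership-counting re-implementation: instead of pairwise set
--     intersections, count in how many of the three frequency-filtered sets
--     each word occurs and keep, per genre, the words with multiplicity 1."""
--     sets = [{k for k, v in frecs[i].items() if v > min_frec} for i in range(3)]
--     count = {}
--     for s in sets:
--         for w in s:
--             count[w] = count.get(w, 0) + 1
--     return [{w for w in s if count[w] == 1} for s in sets]
-- ===== Notes on version B (the rewrite author's own statement) =====
-- stated objective: alternative
-- what changed: Replaces A's pairwise-intersection set algebra ((S0|S1|S2) - ((S0&S1)|(S0&S2)|(S1&S2)) then & each set) by a single membership-count dict (how many of the three filtered sets contain each word) and per-genre filtering of the words with multiplicity exactly 1.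
import Mathlib
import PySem

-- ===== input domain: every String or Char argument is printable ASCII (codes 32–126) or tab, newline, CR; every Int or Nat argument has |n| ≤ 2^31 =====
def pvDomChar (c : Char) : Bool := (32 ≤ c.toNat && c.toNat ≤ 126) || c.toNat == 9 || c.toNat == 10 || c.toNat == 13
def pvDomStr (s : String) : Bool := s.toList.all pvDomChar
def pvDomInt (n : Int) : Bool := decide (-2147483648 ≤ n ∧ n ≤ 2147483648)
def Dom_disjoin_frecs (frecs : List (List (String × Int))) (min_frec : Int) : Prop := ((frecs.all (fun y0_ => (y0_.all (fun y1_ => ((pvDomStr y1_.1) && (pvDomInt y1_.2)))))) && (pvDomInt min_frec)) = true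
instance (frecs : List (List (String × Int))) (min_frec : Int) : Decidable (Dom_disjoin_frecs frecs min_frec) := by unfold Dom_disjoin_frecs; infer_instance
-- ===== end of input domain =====

-- B replaces A's pairwise-intersection set algebra by a membership-counting dict
-- (multiplicity-1 words per genre); same asymptotic cost, different decomposition.


-- ===== PORT A =====
-- the three Counter arguments arrive as association lists; each is a dict (PySem.Dict.ofList);
-- frecs[i][k] on a Counter is getD k 0 (a Counter returns 0 for a missing key, never raises)
def disjoin_frecs (frecs : List (List (String × Int))) (min_frec : Int) : List (List String) :=
  let sets : List (PySem.Set String) :=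
    (PySem.List.pyRange 0 3 1).foldl (fun sets i =>
      let d : PySem.Dict String Int := PySem.Dict.ofList (PySem.List.pyGetD frecs i [])
      let s : PySem.Set String :=
        d.keys.foldl (fun s k => if d.getD k 0 > min_frec then PySem.Set.add s k else s)
          PySem.Set.empty
      sets ++ [s]) []
  let s0 := PySem.List.pyGetD sets 0 []
  let s1 := PySem.List.pyGetD sets 1 []
  let s2 := PySem.List.pyGetD sets 2 []
  let s := PySem.Set.diff (PySem.Set.union (PySem.Set.union s0 s1) s2)
      (PySem.Set.union (PySem.Set.union (PySem.Set.inter s0 s1) (PySem.Set.inter s0 s2))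
        (PySem.Set.inter s1 s2))
  [PySem.Set.inter s s0, PySem.Set.inter s s1, PySem.Set.inter s s2]

-- ===== PORT B =====
def disjoin_frecs_alt (frecs : List (List (String × Int))) (min_frec : Int) : List (List String) :=
  let sets : List (PySem.Set String) :=
    (PySem.List.pyRange 0 3 1).map (fun i =>
      PySem.Set.ofList
        ((((PySem.Dict.ofList (PySem.List.pyGetD frecs i [])).items.filter
            (fun p => decide (p.2 > min_frec))).map (fun p => p.1))))
  let count : PySem.Dict String Int :=
    sets.foldl (fun d s => s.foldl (fun d w => d.insert w (d.getD w 0 + 1)) d) PySem.Dict.empty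
  sets.map (fun s => PySem.Set.ofList (s.filter (fun w => count.getD w 0 == 1)))

-- ===== PRECONDITION & SPEC =====
-- A indexes frecs[0], frecs[1], frecs[2]: fewer than 3 counters raises IndexError
def Pre_disjoin_frecs (frecs : List (List (String × Int))) (min_frec : Int) : Prop :=
  3 ≤ frecs.length
instance (frecs : List (List (String × Int))) (min_frec : Int) : Decidable (Pre_disjoin_frecs frecs min_frec) := by unfold Pre_disjoin_frecs; infer_instance

def pvWitness_disjoin_frecs : (List (List (String × Int))) × Int :=
  ([[("a", 2), ("b", 1)], [("b", 3)], [("c", 3)]], 1)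

def Spec_disjoin_frecs (frecs : List (List (String × Int))) (min_frec : Int) (out : List (List String)) : Prop := out = disjoin_frecs_alt frecs min_frec
instance (frecs : List (List (String × Int))) (min_frec : Int) (out : List (List String)) : Decidable (Spec_disjoin_frecs frecs min_frec out) := by unfold Spec_disjoin_frecs; infer_instance

-- ===== CLAIM (what is proved, stated in full; the proofs are below) =====
def Claim_equal_disjoin_frecs : Prop := ∀ (frecs : List (List (String × Int))) (min_frec : Int), Dom_disjoin_frecs frecs min_frec → Pre_disjoin_frecs frecs min_frec → Spec_disjoin_frecs frecs min_frec (disjoin_frecs frecs min_frec)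

-- ===== LEMMAS AND PROOFS =====

-- A's inner loop (add-if over a nodup key list, from an accumulator disjoint from it) is a filter
theorem foldl_add_if_eq_filter {α : Type} [BEq α] [LawfulBEq α] (p : α → Prop) [DecidablePred p]
    (l : List α) (acc : List α) (hnd : l.Nodup) (hdisj : ∀ x ∈ l, x ∉ acc) :
    l.foldl (fun s k => if p k then PySem.Set.add s k else s) acc
      = acc ++ l.filter (fun k => decide (p k)) := by
  induction l generalizing acc with
  | nil => simp
  | cons x xs ih =>
    rcases List.nodup_cons.mp hnd with ⟨hx, hxs⟩
    simp only [List.foldl_cons, List.filter_cons]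
    by_cases hp : p x
    · have hadd : PySem.Set.add acc x = acc ++ [x] :=
        PySem.Set.add_of_not_mem (hdisj x (List.mem_cons_self))
      have hd2 : ∀ y ∈ xs, y ∉ acc ++ [x] := by
        intro y hy hmem
        rcases List.mem_append.mp hmem with h | h
        · exact hdisj y (List.mem_cons_of_mem _ hy) h
        · have : y = x := by simpa using h
          exact hx (this ▸ hy)
      rw [if_pos hp, hadd, ih _ hxs hd2]
      simp [hp, List.append_assoc]
    · rw [if_neg hp, ih _ hxs (fun y hy => hdisj y (List.mem_cons_of_mem _ hy))]
      simp [hp]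

-- both versions build the same frequency-filtered set for one counter
theorem set_i_eq (d : PySem.Dict String Int) (min_frec : Int) (h : d.keys.Nodup) :
    d.keys.foldl (fun s k => if d.getD k 0 > min_frec then PySem.Set.add s k else s)
        PySem.Set.empty
      = PySem.Set.ofList
          (((d.items.filter (fun p => decide (p.2 > min_frec))).map (fun p => p.1))) := by
  rw [foldl_add_if_eq_filter (fun k => d.getD k 0 > min_frec) d.keys PySem.Set.empty h
      (by intro x _ hc; simp [PySem.Set.empty] at hc)]
  rw [PySem.Dict.items_eq_map_keys d h 0]
  rw [List.filter_map, List.map_map]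
  simp only [Function.comp_def, List.map_id']
  rw [PySem.Set.ofList_eq_self_of_nodup _ (List.Nodup.filter _ h)]
  simp [PySem.Set.empty]

theorem count_nodup_mem {w : String} {S : List String} (h : S.Nodup) :
    S.count w = if w ∈ S then 1 else 0 := by
  split_ifs with hm
  · exact List.count_eq_one_of_mem h hm
  · exact List.count_eq_zero_of_not_mem hm

-- the central equality: on three nodup lists, A's set algebra equals B's multiplicity-1 filters
theorem central (S0 S1 S2 : List String) (h0 : S0.Nodup) (h1 : S1.Nodup) (h2 : S2.Nodup)
    (cnt : String → Int)
    (hcnt : ∀ w, cnt w = (S0.count w : Int) + (S1.count w : Int) + (S2.count w : Int)) :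
    [PySem.Set.inter
        (PySem.Set.diff (PySem.Set.union (PySem.Set.union S0 S1) S2)
          (PySem.Set.union (PySem.Set.union (PySem.Set.inter S0 S1) (PySem.Set.inter S0 S2))
            (PySem.Set.inter S1 S2))) S0,
     PySem.Set.inter
        (PySem.Set.diff (PySem.Set.union (PySem.Set.union S0 S1) S2)
          (PySem.Set.union (PySem.Set.union (PySem.Set.inter S0 S1) (PySem.Set.inter S0 S2))
            (PySem.Set.inter S1 S2))) S1,
     PySem.Set.inter
        (PySem.Set.diff (PySem.Set.union (PySem.Set.union S0 S1) S2)
          (PySem.Set.union (PySem.Set.union (PySem.Set.inter S0 S1) (PySem.Set.inter S0 S2))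
            (PySem.Set.inter S1 S2))) S2]
      = [S0.filter (fun w => cnt w == 1), S1.filter (fun w => cnt w == 1),
         S2.filter (fun w => cnt w == 1)] := by
  have hval : ∀ w, (cnt w == 1) =
      (decide (w ∈ S0) && !decide (w ∈ S1) && !decide (w ∈ S2)
        || !decide (w ∈ S0) && decide (w ∈ S1) && !decide (w ∈ S2)
        || !decide (w ∈ S0) && !decide (w ∈ S1) && decide (w ∈ S2)) := by
    intro w
    have e := hcnt w
    rw [count_nodup_mem h0, count_nodup_mem h1, count_nodup_mem h2] at e
    by_cases m0 : w ∈ S0 <;> by_cases m1 : w ∈ S1 <;> by_cases m2 : w ∈ S2 <;>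
      simp [m0, m1, m2] at e ⊢ <;> omega
  set P := PySem.Set.union (PySem.Set.union (PySem.Set.inter S0 S1) (PySem.Set.inter S0 S2))
      (PySem.Set.inter S1 S2) with hP
  have hmemP : ∀ w, w ∈ P ↔ (w ∈ S0 ∧ w ∈ S1) ∨ (w ∈ S0 ∧ w ∈ S2) ∨ (w ∈ S1 ∧ w ∈ S2) := by
    intro w
    rw [hP]
    simp only [PySem.Set.union, PySem.Set.inter, PySem.Set.mem_update, List.mem_filter,
      PySem.Set.contains, List.contains_eq_mem, decide_eq_true_eq]
    tauto
  have hU01 : PySem.Set.union S0 S1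
      = S0 ++ S1.filter (fun y => !(PySem.Set.contains S0 y)) := by
    simp only [PySem.Set.union]
    rw [PySem.Set.update_eq_append_filter, PySem.Set.ofList_eq_self_of_nodup _ h1]
  have hU : PySem.Set.union (PySem.Set.union S0 S1) S2
      = (S0 ++ S1.filter (fun y => !(PySem.Set.contains S0 y)))
          ++ S2.filter (fun y => !(PySem.Set.contains (PySem.Set.union S0 S1) y)) := by
    conv_lhs => rw [show PySem.Set.union (PySem.Set.union S0 S1) S2
      = PySem.Set.update (PySem.Set.union S0 S1) S2 from rfl]
    rw [PySem.Set.update_eq_append_filter, PySem.Set.ofList_eq_self_of_nodup _ h2, hU01]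
  simp only [PySem.Set.inter, PySem.Set.diff, List.filter_filter]
  rw [hU]
  simp only [List.filter_append, List.filter_filter]
  refine List.cons_eq_cons.mpr ⟨?_, List.cons_eq_cons.mpr ⟨?_, List.cons_eq_cons.mpr ⟨?_, rfl⟩⟩⟩
  · -- genre 0: the S0-chunk is the answer, the S1- and S2-chunks vanish
    have c1 : S1.filter (fun a => PySem.Set.contains S0 a && !PySem.Set.contains P a &&
        !PySem.Set.contains S0 a) = [] := by
      refine List.filter_eq_nil_iff.mpr ?_
      intro a _ h
      simp only [Bool.and_eq_true, Bool.not_eq_true', PySem.Set.contains,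
        List.contains_eq_mem, decide_eq_true_eq, decide_eq_false_iff_not] at h
      exact h.2 h.1.1
    have c2 : S2.filter (fun a => PySem.Set.contains S0 a && !PySem.Set.contains P a &&
        !PySem.Set.contains (PySem.Set.union S0 S1) a) = [] := by
      refine List.filter_eq_nil_iff.mpr ?_
      intro a _ h
      simp only [Bool.and_eq_true, Bool.not_eq_true', PySem.Set.contains,
        List.contains_eq_mem, decide_eq_true_eq, decide_eq_false_iff_not,
        PySem.Set.mem_union] at h
      exact h.2 (Or.inl h.1.1)
    rw [c1, c2, List.append_nil, List.append_nil]
    refine List.filter_congr ?_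
    intro w hw
    rw [hval w]
    simp only [PySem.Set.contains, List.contains_eq_mem, hmemP]
    by_cases m1 : w ∈ S1 <;> by_cases m2 : w ∈ S2 <;> simp [hw, m1, m2]
  · -- genre 1: the S0- and S2-chunks vanish
    have c0 : S0.filter (fun a => PySem.Set.contains S1 a && !PySem.Set.contains P a) = [] := by
      refine List.filter_eq_nil_iff.mpr ?_
      intro a ha h
      simp only [Bool.and_eq_true, Bool.not_eq_true', PySem.Set.contains,
        List.contains_eq_mem, decide_eq_true_eq, decide_eq_false_iff_not] at h
      exact (h.2 ((hmemP a).mpr (Or.inl ⟨ha, h.1⟩))).elim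
    have c2 : S2.filter (fun a => PySem.Set.contains S1 a && !PySem.Set.contains P a &&
        !PySem.Set.contains (PySem.Set.union S0 S1) a) = [] := by
      refine List.filter_eq_nil_iff.mpr ?_
      intro a _ h
      simp only [Bool.and_eq_true, Bool.not_eq_true', PySem.Set.contains,
        List.contains_eq_mem, decide_eq_true_eq, decide_eq_false_iff_not,
        PySem.Set.mem_union] at h
      exact h.2 (Or.inr h.1.1)
    rw [c0, c2, List.nil_append, List.append_nil]
    refine List.filter_congr ?_
    intro w hw
    rw [hval w]
    simp only [PySem.Set.contains, List.contains_eq_mem, hmemP]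
    by_cases m0 : w ∈ S0 <;> by_cases m2 : w ∈ S2 <;> simp [hw, m0, m2]
  · -- genre 2: the S0- and S1-chunks vanish
    have c0 : S0.filter (fun a => PySem.Set.contains S2 a && !PySem.Set.contains P a) = [] := by
      refine List.filter_eq_nil_iff.mpr ?_
      intro a ha h
      simp only [Bool.and_eq_true, Bool.not_eq_true', PySem.Set.contains,
        List.contains_eq_mem, decide_eq_true_eq, decide_eq_false_iff_not] at h
      exact (h.2 ((hmemP a).mpr (Or.inr (Or.inl ⟨ha, h.1⟩)))).elim
    have c1 : S1.filter (fun a => PySem.Set.contains S2 a && !PySem.Set.contains P a &&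
        !PySem.Set.contains S0 a) = [] := by
      refine List.filter_eq_nil_iff.mpr ?_
      intro a ha h
      simp only [Bool.and_eq_true, Bool.not_eq_true', PySem.Set.contains,
        List.contains_eq_mem, decide_eq_true_eq, decide_eq_false_iff_not] at h
      exact (h.1.2 ((hmemP a).mpr (Or.inr (Or.inr ⟨ha, h.1.1⟩)))).elim
    rw [c0, c1, List.nil_append, List.nil_append]
    refine List.filter_congr ?_
    intro w hw
    rw [hval w]
    simp only [PySem.Set.contains, List.contains_eq_mem, hmemP]
    by_cases m0 : w ∈ S0 <;> by_cases m1 : w ∈ S1 <;> simp [hw, m0, m1]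

-- ===== VERDICT (by name: the statement is the Claim_ definition above) =====
theorem disjoin_frecs_spec : Claim_equal_disjoin_frecs := by
  intro frecs min_frec _ hPre
  unfold Spec_disjoin_frecs
  obtain ⟨a, b, c, rest, rfl⟩ : ∃ a b c rest, frecs = a :: b :: c :: rest := by
    rcases frecs with _ | ⟨a, _ | ⟨b, _ | ⟨c, rest⟩⟩⟩
    · exact absurd hPre (by unfold Pre_disjoin_frecs; simp only [List.length_nil]; omega)
    · exact absurd hPre (by unfold Pre_disjoin_frecs; simp only [List.length_cons, List.length_nil]; omega)
    · exact absurd hPre (by unfold Pre_disjoin_frecs; simp only [List.length_cons, List.length_nil]; omega)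
    · exact ⟨a, b, c, rest, rfl⟩
  unfold disjoin_frecs disjoin_frecs_alt
  rw [show PySem.List.pyRange 0 3 1 = [0, 1, 2] from by decide]
  simp only [List.foldl_cons, List.foldl_nil, List.map_cons, List.map_nil, List.nil_append]
  rw [show PySem.List.pyGetD (a :: b :: c :: rest) (0 : Int) [] = a from by simp [pysem],
      show PySem.List.pyGetD (a :: b :: c :: rest) (1 : Int) [] = b from by simp [pysem],
      show PySem.List.pyGetD (a :: b :: c :: rest) (2 : Int) [] = c from by simp [pysem]]
  rw [set_i_eq _ min_frec (PySem.Dict.nodup_keys_ofList _),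
      set_i_eq _ min_frec (PySem.Dict.nodup_keys_ofList _),
      set_i_eq _ min_frec (PySem.Dict.nodup_keys_ofList _)]
  set T0 := PySem.Set.ofList ((((PySem.Dict.ofList a).items.filter
      (fun p => decide (p.2 > min_frec))).map (fun p => p.1))) with hT0
  set T1 := PySem.Set.ofList ((((PySem.Dict.ofList b).items.filter
      (fun p => decide (p.2 > min_frec))).map (fun p => p.1))) with hT1
  set T2 := PySem.Set.ofList ((((PySem.Dict.ofList c).items.filter
      (fun p => decide (p.2 > min_frec))).map (fun p => p.1))) with hT2
  have n0 : T0.Nodup := PySem.Set.nodup_ofList _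
  have n1 : T1.Nodup := PySem.Set.nodup_ofList _
  have n2 : T2.Nodup := PySem.Set.nodup_ofList _
  set count : PySem.Dict String Int :=
    T2.foldl (fun d w => d.insert w (d.getD w 0 + 1))
      (T1.foldl (fun d w => d.insert w (d.getD w 0 + 1))
        (T0.foldl (fun d w => d.insert w (d.getD w 0 + 1)) PySem.Dict.empty)) with hcountdef
  have hcnt : ∀ w, count.getD w 0 = (T0.count w : Int) + (T1.count w : Int) + (T2.count w : Int) := by
    intro w
    rw [hcountdef, PySem.Dict.getD_foldl_insert_add_one, PySem.Dict.getD_foldl_insert_add_one,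
        PySem.Dict.getD_foldl_insert_add_one]
    simp [PySem.Dict.getD_empty]
  simp only [List.cons_append, List.nil_append]
  have g0 : PySem.List.pyGetD [T0, T1, T2] (0 : Int) [] = T0 := by
    rw [PySem.List.pyGetD_ofNat']; rfl
  have g1 : PySem.List.pyGetD [T0, T1, T2] (1 : Int) [] = T1 := by
    rw [PySem.List.pyGetD_ofNat']; rfl
  have g2 : PySem.List.pyGetD [T0, T1, T2] (2 : Int) [] = T2 := by
    rw [PySem.List.pyGetD_ofNat']; rfl
  rw [g0, g1, g2]
  rw [PySem.Set.ofList_eq_self_of_nodup _ (List.Nodup.filter _ n0),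
      PySem.Set.ofList_eq_self_of_nodup _ (List.Nodup.filter _ n1),
      PySem.Set.ofList_eq_self_of_nodup _ (List.Nodup.filter _ n2)]
  exact central T0 T1 T2 n0 n1 n2 (fun w => count.getD w 0) hcnt
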